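-- pv_equiv track=rewrite | github.com/mbaljko/vault-grading-pipeline | 01_units/pipelines/pl1C_rubric_devt/python/generate-layer3-grade-award-report.py | build_component_grade_rows
-- ===== SOURCE A (Python) =====
-- from collections import Counter, defaultdict
--
-- def build_component_grade_rows(rows: list[dict[str, str]]) -> list[list[str]]:
--     component_grade_counts: dict[str, Counter[str]] = defaultdict(Counter)
--     for row in rows:
--         component_id = str(row.get("component_id", "")).strip() or "(unknown)"
--         component_score = str(row.get("component_score", "")).strip()
--         if component_score:
--             component_grade_counts[component_id][component_score] += 1
--
--     table_rows: list[list[str]] = []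
--     for component_id in sorted(component_grade_counts):
--         counts = component_grade_counts[component_id]
--         total = sum(counts.values())
--         distribution = ", ".join(f"{grade}={counts[grade]}" for grade in sorted(counts))
--         table_rows.append([component_id, str(total), distribution])
--     return table_rows
-- ===== SOURCE B (Python) =====
-- def build_component_grade_rows(rows: list[dict[str, str]]) -> list[list[str]]:
--     def norm(row):
--         cid = str(row.get("component_id", "")).strip() or "(unknown)"
--         return (cid, str(row.get("component_score", "")).strip())
--     pairs = sorted((p for p in map(norm, rows) if p[1]), key=lambda p: p[0])
--     table = []
--     i, n = 0, len(pairs)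
--     while i < n:
--         cid = pairs[i][0]
--         j = i
--         while j < n and pairs[j][0] == cid:
--             j += 1
--         grades = sorted(p[1] for p in pairs[i:j])
--         parts = []
--         k = 0
--         while k < len(grades):
--             g = grades[k]
--             m = k
--             while m < len(grades) and grades[m] == g:
--                 m += 1
--             parts.append(f"{g}={m - k}")
--             k = m
--         table.append([cid, str(j - i), ", ".join(parts)])
--         i = j
--     return table
-- ===== Notes on version B (the rewrite author's own statement) =====
-- stated objective: alternative
-- what changed: Replaces the defaultdict(Counter) hash-aggregation with a sort-then-scan pass: the normalized (id, score) pairs are sorted by id and consumed by index scans that cut each id group and run-length-encode its sorted grades, so no dict or Counter is built at all.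
import Mathlib
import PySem

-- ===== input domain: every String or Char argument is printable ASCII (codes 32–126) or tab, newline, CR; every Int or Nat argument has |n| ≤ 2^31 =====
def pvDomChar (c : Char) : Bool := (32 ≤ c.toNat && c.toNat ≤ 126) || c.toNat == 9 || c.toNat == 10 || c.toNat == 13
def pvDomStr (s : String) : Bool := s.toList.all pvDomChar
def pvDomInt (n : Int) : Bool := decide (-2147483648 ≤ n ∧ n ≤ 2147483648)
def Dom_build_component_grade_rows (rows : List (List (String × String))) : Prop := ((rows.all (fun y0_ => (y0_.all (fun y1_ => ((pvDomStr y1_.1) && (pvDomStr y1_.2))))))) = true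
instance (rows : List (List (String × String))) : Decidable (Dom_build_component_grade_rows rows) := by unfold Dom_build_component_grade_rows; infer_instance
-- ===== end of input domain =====

-- B replaces A's defaultdict(Counter) hash-aggregation by sorting the normalized (id, score)
-- pairs by id and scanning: each id group is cut off consecutively and its sorted grades are
-- run-length encoded (objective: alternative). Equivalence of return values.

-- ===== PORT A =====
def build_component_grade_rows (rows : List (List (String × String))) : List (List String) :=
  let component_grade_counts : PySem.Dict String (PySem.Dict String Int) :=
    rows.foldl (fun d row =>
      let cid0 := PySem.Str.strip ((row.lookup "component_id").getD "")
      let component_id := if cid0 = "" then "(unknown)" else cid0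
      let component_score := PySem.Str.strip ((row.lookup "component_score").getD "")
      if component_score = "" then d
      else d.modify component_id PySem.Dict.empty (fun c => c.modify component_score 0 (· + 1)))
      PySem.Dict.empty
  (PySem.List.sorted component_grade_counts.keys (fun k => k) false).foldl
    (fun table_rows component_id =>
      let counts := component_grade_counts.getD component_id PySem.Dict.empty
      let total := counts.values.sum
      let distribution := PySem.Str.join ", "
        ((PySem.List.sorted counts.keys (fun g => g) false).map
          (fun grade => grade ++ "=" ++ PySem.Int.toStr (counts.getD grade 0)))
      table_rows ++ [[component_id, PySem.Int.toStr total, distribution]]) []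

-- ===== PORT B =====
/-- B's `norm`: the normalized (component id, score) of one row. -/
def pvNorm (row : List (String × String)) : String × String :=
  let cid0 := PySem.Str.strip ((row.lookup "component_id").getD "")
  ((if cid0 = "" then "(unknown)" else cid0),
   PySem.Str.strip ((row.lookup "component_score").getD ""))

/-- B's inner while loop: run-length encode an (already sorted) grade list as "g=count". -/
def pvRLE : List String → List String
  | [] => []
  | g :: rest =>
      (g ++ "=" ++ PySem.Int.toStr (((rest.takeWhile (· == g)).length + 1 : Nat) : Int))
        :: pvRLE (rest.dropWhile (· == g))
  termination_by ys => ys.length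
  decreasing_by
    simpa using Nat.lt_succ_of_le (List.length_dropWhile_le (· == g) rest)

/-- B's outer while loop: cut off each consecutive id group of the id-sorted pair list. -/
def pvGroups : List (String × String) → List (List String)
  | [] => []
  | p :: rest =>
      let grp := rest.takeWhile (fun q => q.1 == p.1)
      let grades := PySem.List.sorted (p.2 :: grp.map (·.2)) (fun g => g) false
      [p.1, PySem.Int.toStr ((grp.length + 1 : Nat) : Int), PySem.Str.join ", " (pvRLE grades)]
        :: pvGroups (rest.dropWhile (fun q => q.1 == p.1))
  termination_by ps => ps.length
  decreasing_by
    simpa using Nat.lt_succ_of_le (List.length_dropWhile_le (fun q => q.1 == p.1) rest)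

def build_component_grade_rows_alt (rows : List (List (String × String))) : List (List String) :=
  let pairs := PySem.List.sorted ((rows.map pvNorm).filter (fun p => !(p.2 == ""))) (·.1) false
  pvGroups pairs

-- ===== PRECONDITION & SPEC =====
def Spec_build_component_grade_rows (rows : List (List (String × String))) (out : List (List String)) : Prop := out = build_component_grade_rows_alt rows
instance (rows : List (List (String × String))) (out : List (List String)) : Decidable (Spec_build_component_grade_rows rows out) := by unfold Spec_build_component_grade_rows; infer_instance

-- ===== CLAIM (what is proved, stated in full; the proofs are below) =====
def Claim_equal_build_component_grade_rows : Prop := ∀ (rows : List (List (String × String))), Dom_build_component_grade_rows rows → Spec_build_component_grade_rows rows (build_component_grade_rows rows)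

-- ===== LEMMAS AND PROOFS =====

/-- The normalized (component id, score) contribution of one input row (0 or 1 pairs). -/
def pvStep (row : List (String × String)) : List (String × String) :=
  if (pvNorm row).2 = "" then [] else [pvNorm row]

/-- A's per-row dict update, as a function of the normalized pair. -/
def pvAdd1 (d : PySem.Dict String (PySem.Dict String Int)) (p : String × String) :
    PySem.Dict String (PySem.Dict String Int) :=
  d.modify p.1 PySem.Dict.empty (fun c => c.modify p.2 0 (· + 1))

/-- The "grade=count" distribution of an (unsorted) grade list. -/
def pvDist (gs : List String) : List String :=
  (PySem.List.sorted (PySem.Set.ofList gs) (fun g => g) false).map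
    (fun g => g ++ "=" ++ PySem.Int.toStr ((gs.count g : Nat) : Int))

/-- The table row for one component id, computed from the flat pair list. -/
def pvSpecRow (ps : List (String × String)) (cid : String) : List String :=
  let gs := (ps.filter (fun p => p.1 == cid)).map (·.2)
  [cid, PySem.Int.toStr ((gs.length : Nat) : Int), PySem.Str.join ", " (pvDist gs)]

/-- The whole table, computed from the flat pair list. -/
def pvSpec (ps : List (String × String)) : List (List String) :=
  (PySem.List.sorted (PySem.Set.ofList (ps.map (·.1))) (fun c => c) false).map (pvSpecRow ps)

lemma pvFoldA_eq (rows : List (List (String × String))) (d : PySem.Dict String (PySem.Dict String Int)) :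
    rows.foldl (fun d row =>
      if PySem.Str.strip ((row.lookup "component_score").getD "") = "" then d
      else d.modify
        (if PySem.Str.strip ((row.lookup "component_id").getD "") = "" then "(unknown)"
         else PySem.Str.strip ((row.lookup "component_id").getD "")) PySem.Dict.empty
        (fun c => c.modify (PySem.Str.strip ((row.lookup "component_score").getD "")) 0 (· + 1))) d
    = (rows.flatMap pvStep).foldl pvAdd1 d := by
  induction rows generalizing d with
  | nil => rfl
  | cons row rest ih =>
    simp only [List.foldl_cons, List.flatMap_cons, List.foldl_append, pvStep, pvNorm]
    by_cases h : PySem.Str.strip ((row.lookup "component_score").getD "") = "" <;>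
      simp [h, ih, pvAdd1]

/-- The inner Counter of A's dict at key `c` is the fold of the grades filtered for `c`. -/
lemma pvInner_getD (ps : List (String × String)) (d : PySem.Dict String (PySem.Dict String Int))
    (c : String) :
    (ps.foldl pvAdd1 d).getD c PySem.Dict.empty
      = ((ps.filter (fun p => p.1 == c)).map (·.2)).foldl
          (fun cnt g => cnt.modify g 0 (· + 1)) (d.getD c PySem.Dict.empty) := by
  induction ps generalizing d with
  | nil => rfl
  | cons p rest ih =>
    simp only [List.foldl_cons, ih, pvAdd1, List.filter_cons]
    by_cases h : p.1 = c
    · subst h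
      simp [PySem.Dict.getD_modify_self]
    · have hne : ¬ (p.1 == c) = true := by simp [h]
      simp [hne, PySem.Dict.getD_modify_of_ne _ _ _ (Ne.symm h)]

/-- Sum of the multiplicities over the distinct elements is the length. -/
lemma pvSum_count (gs : List String) :
    ((PySem.Set.ofList gs : List String).map (fun g => ((gs.count g : Nat) : Int))).sum
      = (gs.length : Int) := by
  have hperm : (PySem.Set.ofList gs : List String).Perm gs.dedup := by
    refine (List.perm_ext_iff_of_nodup (PySem.Set.nodup_ofList gs) (List.nodup_dedup gs)).2 ?_
    intro a; rw [PySem.Set.mem_ofList, List.mem_dedup]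
  rw [(hperm.map (fun g => ((gs.count g : Nat) : Int))).sum_eq]
  have h2 : ∀ (l : List String),
      (l.map (fun g => ((gs.count g : Nat) : Int))).sum = (((l.map (fun g => gs.count g)).sum : Nat) : Int) := by
    intro l; induction l with
    | nil => rfl
    | cons x xs ih => simp [ih]
  rw [h2, List.sum_map_count_dedup_eq_length]

/-- The Counter built from grade list `gs`: lookup is the count. -/
lemma pvCnt_getD (gs : List String) (g : String) :
    (gs.foldl (fun cnt h => cnt.modify h 0 (· + 1)) (PySem.Dict.empty : PySem.Dict String Int)).getD g 0
      = ((gs.count g : Nat) : Int) := by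
  rw [PySem.Dict.getD_foldl_modify_add_one]
  simp [pysem]

/-- The Counter built from grade list `gs`: keys are the distinct grades in first-seen order. -/
lemma pvCnt_keys (gs : List String) :
    (gs.foldl (fun cnt h => cnt.modify h 0 (· + 1)) (PySem.Dict.empty : PySem.Dict String Int)).keys
      = (PySem.Set.ofList gs : List String) := by
  rw [PySem.Dict.keys_foldl_modify gs 0 (fun _ _ => (· + 1))]
  rfl

lemma pvCnt_values_sum (gs : List String) :
    (gs.foldl (fun cnt h => cnt.modify h 0 (· + 1)) (PySem.Dict.empty : PySem.Dict String Int)).values.sum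
      = (gs.length : Int) := by
  rw [PySem.Dict.values_eq_map_keys _ (by rw [pvCnt_keys]; exact PySem.Set.nodup_ofList gs) 0]
  rw [pvCnt_keys]
  rw [List.map_congr_left (fun g (_ : g ∈ (PySem.Set.ofList gs : List String)) => pvCnt_getD gs g)]
  exact pvSum_count gs

/-- A's outer dict over the flat pair list: keys are the distinct component ids. -/
lemma pvOuter_keys (ps : List (String × String)) :
    (ps.foldl pvAdd1 PySem.Dict.empty).keys = (PySem.Set.ofList (ps.map (·.1)) : List String) := by
  rw [show pvAdd1 = (fun d p => d.modify ((·.1) p) PySem.Dict.empty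
        ((fun (_ : PySem.Dict String (PySem.Dict String Int)) (p : String × String)
          (c : PySem.Dict String Int) => c.modify p.2 0 (· + 1)) d p)) from rfl,
      PySem.Dict.keys_foldl_modify_key ps (·.1) PySem.Dict.empty _ PySem.Dict.empty]
  rfl

/-- A computes the spec form over the flat normalized pair list. -/
lemma pvA_eq_spec (rows : List (List (String × String))) :
    build_component_grade_rows rows = pvSpec (rows.flatMap pvStep) := by
  simp only [build_component_grade_rows, pvSpec, pvFoldA_eq,
    PySem.List.foldl_append_singleton_eq_map, List.nil_append]
  rw [pvOuter_keys]
  congr 1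
  funext component_id
  rw [pvInner_getD]
  have hempty : (PySem.Dict.empty : PySem.Dict String (PySem.Dict String Int)).getD component_id PySem.Dict.empty
      = PySem.Dict.empty := by simp [pysem]
  rw [hempty, pvCnt_values_sum, pvCnt_keys]
  simp only [pvCnt_getD, pvSpecRow, pvDist]

/-- B's pre-sort pair list is the flat normalized pair list. -/
lemma pvPairs_eq (rows : List (List (String × String))) :
    (rows.map pvNorm).filter (fun p => !(p.2 == "")) = rows.flatMap pvStep := by
  induction rows with
  | nil => rfl
  | cons row rest ih =>
    simp only [List.map_cons, List.filter_cons, List.flatMap_cons, pvStep]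
    by_cases h : (pvNorm row).2 = "" <;> simp [h, ih]

/-- pvDist only depends on the multiset of grades. -/
lemma pvSetOfList_perm {α : Type} [DecidableEq α] {l l' : List α} (h : l.Perm l') :
    (PySem.Set.ofList l : List α).Perm (PySem.Set.ofList l') := by
  refine (List.perm_ext_iff_of_nodup (PySem.Set.nodup_ofList l) (PySem.Set.nodup_ofList l')).2 ?_
  intro a
  rw [PySem.Set.mem_ofList, PySem.Set.mem_ofList]
  exact h.mem_iff

lemma pvDist_perm {gs gs' : List String} (h : gs.Perm gs') : pvDist gs = pvDist gs' := by
  unfold pvDist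
  rw [PySem.List.sorted_eq_sorted_of_perm _ _ _ (fun a b hab => hab) (pvSetOfList_perm h)]
  exact List.map_congr_left (fun g _ => by rw [h.count_eq])

/-- pvSpec only depends on the multiset of pairs. -/
lemma pvSpecRow_perm {ps qs : List (String × String)} (h : ps.Perm qs) (cid : String) :
    pvSpecRow ps cid = pvSpecRow qs cid := by
  simp only [pvSpecRow]
  have hfil : ((ps.filter (fun p => p.1 == cid)).map (·.2)).Perm
      ((qs.filter (fun p => p.1 == cid)).map (·.2)) := (h.filter _).map _
  rw [hfil.length_eq, pvDist_perm hfil]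

lemma pvSpec_perm {ps qs : List (String × String)} (h : ps.Perm qs) : pvSpec ps = pvSpec qs := by
  unfold pvSpec
  rw [PySem.List.sorted_eq_sorted_of_perm _ _ _ (fun a b hab => hab) (pvSetOfList_perm (h.map (·.1)))]
  exact List.map_congr_left (fun cid _ => pvSpecRow_perm h cid)

/-- In a list that is sorted under the projection `f` and bounded below by `g`,
    everything surviving `dropWhile (f · == g)` is strictly above `g`. -/
lemma pvDropWhile_lt {α : Type} (f : α → String) (g : String) (l : List α)
    (hp : l.Pairwise (fun a b => f a ≤ f b)) (hge : ∀ y ∈ l, g ≤ f y) :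
    ∀ y ∈ l.dropWhile (fun y => f y == g), g < f y := by
  induction l with
  | nil => simp
  | cons x t ih =>
    rw [List.pairwise_cons] at hp
    rw [List.dropWhile_cons]
    by_cases hx : f x = g
    · simp only [hx, beq_self_eq_true, if_true]
      exact ih hp.2 (fun y hy => hge y (List.mem_cons_of_mem x hy))
    · have hgx : g < f x :=
        lt_of_le_of_ne (hge x List.mem_cons_self) (fun e => hx e.symm)
      simp only [beq_iff_eq, hx, if_false]
      intro y hy
      rcases List.mem_cons.1 hy with rfl | hyt
      · exact hgx
      · exact lt_of_lt_of_le hgx (hp.1 y hyt)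

/-- sorted(set(g :: mid ++ after)) when mid is all `g` and after is strictly above `g`. -/
lemma pvSortedSet_cons (g : String) (mid after : List String)
    (hmid : ∀ y ∈ mid, y = g) (hafter : ∀ y ∈ after, g < y) :
    PySem.List.sorted (PySem.Set.ofList (g :: (mid ++ after))) (fun x => x) false
      = g :: PySem.List.sorted (PySem.Set.ofList after) (fun x => x) false := by
  have hsa : ∀ y ∈ PySem.List.sorted (PySem.Set.ofList after) (fun x => x) false, g < y :=
    fun y hy => hafter y ((PySem.Set.mem_ofList _ _).1 ((PySem.List.mem_sorted _ _ _ _).1 hy))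
  apply PySem.List.sorted_eq_of_perm_of_pairwise_lt
  · refine (List.perm_ext_iff_of_nodup ?_ (PySem.Set.nodup_ofList _)).2 ?_
    · refine List.nodup_cons.2 ⟨fun hg => absurd (hsa g hg) (lt_irrefl g), ?_⟩
      exact ((PySem.List.sorted_perm _ _ _).nodup_iff).2 (PySem.Set.nodup_ofList after)
    · intro a
      simp only [List.mem_cons, PySem.List.mem_sorted, PySem.Set.mem_ofList, List.mem_append]
      constructor
      · rintro (rfl | ha)
        · exact Or.inl rfl
        · exact Or.inr (Or.inr ha)
      · rintro (rfl | hm | ha)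
        · exact Or.inl rfl
        · exact Or.inl (hmid a hm)
        · exact Or.inr ha
  · exact List.pairwise_cons.2 ⟨hsa, PySem.List.sorted_ofList_pairwise_lt after⟩

/-- Multiplicity of the head value in g :: mid ++ after under the same hypotheses. -/
lemma pvCount_head (g : String) (mid after : List String)
    (hmid : ∀ y ∈ mid, y = g) (hafter : ∀ y ∈ after, g < y) :
    (g :: (mid ++ after)).count g = mid.length + 1 := by
  rw [List.count_cons_self, List.count_append]
  have h1 : mid.count g = mid.length :=
    List.count_eq_length.2 (fun b hb => ((hmid b hb).symm : g = b))
  have h2 : after.count g = 0 :=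
    List.count_eq_zero.2 (fun hg => absurd (hafter g hg) (lt_irrefl g))
  omega

/-- Multiplicity of a strictly larger value lives entirely in `after`. -/
lemma pvCount_tail (g x : String) (mid after : List String)
    (hmid : ∀ y ∈ mid, y = g) (hx : g < x) :
    (g :: (mid ++ after)).count x = after.count x := by
  have hxg : x ≠ g := fun e => absurd hx (by rw [e]; exact lt_irrefl g)
  have h1 : mid.count x = 0 :=
    List.count_eq_zero.2 (fun hm => hxg (hmid x hm))
  have hgx : ¬ g = x := fun e => hxg e.symm
  simp [List.count_append, h1, hgx]

/-- Run-length encoding of a sorted list is the sorted-distinct/count map. -/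
lemma pvRLE_eq (ys : List String) (h : ys.Pairwise (· ≤ ·)) : pvRLE ys = pvDist ys := by
  induction ys using pvRLE.induct with
  | case1 => simp only [pvRLE]; rfl
  | case2 g rest ih =>
    rw [List.pairwise_cons] at h
    have hmid : ∀ y ∈ rest.takeWhile (· == g), y = g :=
      fun y hy => by simpa using List.mem_takeWhile_imp hy
    have hafter : ∀ y ∈ rest.dropWhile (· == g), g < y :=
      pvDropWhile_lt (fun x => x) g rest h.2 h.1
    have hsplit : rest.takeWhile (· == g) ++ rest.dropWhile (· == g) = rest :=
      List.takeWhile_append_dropWhile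
    simp only [pvRLE]
    rw [ih (h.2.sublist (List.dropWhile_sublist _))]
    unfold pvDist
    rw [show g :: rest = g :: (rest.takeWhile (· == g) ++ rest.dropWhile (· == g)) from by
      rw [hsplit]]
    rw [pvSortedSet_cons g _ _ hmid hafter, List.map_cons]
    congr 1
    · rw [pvCount_head g _ _ hmid hafter]
    · exact (List.map_congr_left (fun x hx =>
        by rw [pvCount_tail g x _ _ hmid (hafter x
          ((PySem.Set.mem_ofList _ _).1 ((PySem.List.mem_sorted _ _ _ _).1 hx)))])).symm

/-- The scan over an id-sorted pair list computes the spec form. -/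
lemma pvGroups_eq (qs : List (String × String)) (h : qs.Pairwise (fun a b => a.1 ≤ b.1)) :
    pvGroups qs = pvSpec qs := by
  induction qs using pvGroups.induct with
  | case1 => simp only [pvGroups]; rfl
  | case2 p rest ih =>
    rw [List.pairwise_cons] at h
    have hmid : ∀ q ∈ rest.takeWhile (fun q => q.1 == p.1), q.1 = p.1 :=
      fun q hq => by simpa using List.mem_takeWhile_imp hq
    have hafter : ∀ q ∈ rest.dropWhile (fun q => q.1 == p.1), p.1 < q.1 :=
      pvDropWhile_lt (·.1) p.1 rest h.2 h.1
    have hsplit : rest.takeWhile (fun q => q.1 == p.1) ++ rest.dropWhile (fun q => q.1 == p.1)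
        = rest := List.takeWhile_append_dropWhile
    have hp' : (rest.dropWhile (fun q => q.1 == p.1)).Pairwise (fun a b => a.1 ≤ b.1) :=
      h.2.sublist (List.dropWhile_sublist _)
    simp only [pvGroups]
    rw [ih hp']
    unfold pvSpec
    have hmap : (p :: rest).map (·.1)
        = p.1 :: ((rest.takeWhile (fun q => q.1 == p.1)).map (·.1)
            ++ (rest.dropWhile (fun q => q.1 == p.1)).map (·.1)) := by
      rw [← List.map_append, hsplit]; rfl
    rw [hmap, pvSortedSet_cons p.1 _ _
      (fun y hy => by obtain ⟨q, hq, rfl⟩ := List.mem_map.1 hy; exact hmid q hq)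
      (fun y hy => by obtain ⟨q, hq, rfl⟩ := List.mem_map.1 hy; exact hafter q hq),
      List.map_cons]
    congr 1
    · -- the head row for component id p.1
      simp only [pvSpecRow]
      have hfilgrp : (rest.takeWhile (fun q => q.1 == p.1)).filter (fun q => q.1 == p.1)
          = rest.takeWhile (fun q => q.1 == p.1) :=
        List.filter_eq_self.2 (fun q hq => by simpa using hmid q hq)
      have hfilrest : (rest.dropWhile (fun q => q.1 == p.1)).filter (fun q => q.1 == p.1) = [] :=
        List.filter_eq_nil_iff.2 (fun q hq => by simpa using (hafter q hq).ne')
      have hfr : rest.filter (fun q => q.1 == p.1) = rest.takeWhile (fun q => q.1 == p.1) := by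
        conv_lhs => rw [← hsplit]
        rw [List.filter_append, hfilgrp, hfilrest, List.append_nil]
      have hfil : (p :: rest).filter (fun q => q.1 == p.1)
          = p :: rest.takeWhile (fun q => q.1 == p.1) := by
        rw [List.filter_cons, if_pos (by simp), hfr]
      rw [hfil]
      have hsp : (PySem.List.sorted (p.2 :: (rest.takeWhile (fun q => q.1 == p.1)).map (·.2))
          (fun g => g) false).Pairwise (· ≤ ·) := PySem.List.sorted_pairwise _ _
      rw [pvRLE_eq _ hsp, pvDist_perm (PySem.List.sorted_perm _ _ false)]
      simp
    · -- the remaining rows only look at the pairs beyond the group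
      refine (List.map_congr_left (fun cid hcid => ?_)).symm
      have hgt : p.1 < cid := by
        obtain ⟨q, hq, rfl⟩ := List.mem_map.1
          ((PySem.Set.mem_ofList _ _).1 ((PySem.List.mem_sorted _ _ _ _).1 hcid))
        exact hafter q hq
      simp only [pvSpecRow]
      have hfil : (p :: rest).filter (fun q => q.1 == cid)
          = (rest.dropWhile (fun q => q.1 == p.1)).filter (fun q => q.1 == cid) := by
        have h0 : (rest.takeWhile (fun q => q.1 == p.1)).filter (fun q => q.1 == cid) = [] :=
          List.filter_eq_nil_iff.2 (fun q hq => by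
            rw [hmid q hq]; simpa using hgt.ne)
        have h1 : rest.filter (fun q => q.1 == cid)
            = (rest.dropWhile (fun q => q.1 == p.1)).filter (fun q => q.1 == cid) := by
          conv_lhs => rw [← hsplit]
          rw [List.filter_append, h0, List.nil_append]
        rw [List.filter_cons, if_neg (by simpa using hgt.ne), h1]
      rw [hfil]

-- ===== VERDICT (by name: the statement is the Claim_ definition above) =====
theorem build_component_grade_rows_spec : Claim_equal_build_component_grade_rows := by
  intro rows _
  unfold Spec_build_component_grade_rows
  rw [pvA_eq_spec]
  unfold build_component_grade_rows_alt
  rw [pvPairs_eq] at *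
  rw [pvGroups_eq _ (by simpa using PySem.List.sorted_pairwise (rows.flatMap pvStep) (·.1)),
      pvSpec_perm (PySem.List.sorted_perm (rows.flatMap pvStep) (·.1) false)]
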